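-- pv_equiv track=rewrite | github.com/Chucooleg/Contrastive-Learning-Benchmarking | SecondPass-CardGame-experiments/data_sampling.py | encode_key_idx
-- ===== SOURCE A (Python) =====
-- def encode_key_idx(num_attributes, num_attr_vals, key_properties):
--     '''
--     reverse of decode_key_idx()
--     '''
--     key_properties = list(key_properties)
--
--     if not key_properties:
--         return num_attr_vals ** num_attributes
--     else:
--         key_idx = 0
--         digit = 0
--         while key_properties:
--             attr_val = key_properties.pop()
--             key_idx += attr_val * (num_attr_vals**digit)
--             digit += 1
--     return int(key_idx)
-- ===== SOURCE B (Python) =====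
-- def encode_key_idx(num_attributes, num_attr_vals, key_properties):
--     '''
--     reverse of decode_key_idx()
--     '''
--     if not key_properties:
--         return num_attr_vals ** num_attributes
--     key_idx = 0
--     for attr_val in key_properties:
--         key_idx = key_idx * num_attr_vals + attr_val
--     return key_idx
-- ===== Notes on version B (the rewrite author's own statement) =====
-- stated objective: faster
-- what changed: Replaces the destructive pop-from-the-back loop that computes num_attr_vals**digit for every digit with a forward Horner multiply-accumulate over the list, never computing an explicit power.
-- outside the precondition, e.g. on encode_key_idx(-1, 2, []): A returns 0.5, B returns 0.5
import Mathlib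
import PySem

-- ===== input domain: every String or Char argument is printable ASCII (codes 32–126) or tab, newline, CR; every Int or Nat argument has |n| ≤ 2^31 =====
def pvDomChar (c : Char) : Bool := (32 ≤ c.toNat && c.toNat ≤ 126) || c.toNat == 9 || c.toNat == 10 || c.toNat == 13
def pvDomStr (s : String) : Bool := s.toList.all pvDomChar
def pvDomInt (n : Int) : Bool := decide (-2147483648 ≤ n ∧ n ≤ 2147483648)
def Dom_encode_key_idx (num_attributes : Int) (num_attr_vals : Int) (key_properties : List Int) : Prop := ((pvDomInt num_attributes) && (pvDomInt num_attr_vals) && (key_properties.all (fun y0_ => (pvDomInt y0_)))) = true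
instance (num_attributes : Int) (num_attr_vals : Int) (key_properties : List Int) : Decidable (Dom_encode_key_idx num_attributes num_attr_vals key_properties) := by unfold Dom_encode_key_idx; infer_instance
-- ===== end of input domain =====

-- B replaces A's destructive pop-from-the-back power-sum loop with a forward Horner
-- multiply-accumulate (no explicit exponentiation); idiomatic, same results.


-- ===== PORT A =====
-- A's while-loop: pops the LAST element, adds attr_val * N^digit, increments digit.
-- Ported as structural recursion over the reversed list (pop from the end = walk the reverse).
def encodeKeyLoop (num_attr_vals : Int) (props : List Int) (key_idx : Int) (digit : Nat) : Int :=
  match props with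
  | [] => key_idx
  | attr_val :: rest => encodeKeyLoop num_attr_vals rest (key_idx + attr_val * num_attr_vals ^ digit) (digit + 1)

def encode_key_idx (num_attributes : Int) (num_attr_vals : Int) (key_properties : List Int) : Int :=
  if key_properties = [] then
    num_attr_vals ^ num_attributes.toNat   -- Python ** ; Pre_ guarantees num_attributes ≥ 0 here (int result)
  else
    encodeKeyLoop num_attr_vals key_properties.reverse 0 0

-- ===== PORT B =====
def encode_key_idx_alt (num_attributes : Int) (num_attr_vals : Int) (key_properties : List Int) : Int :=
  if key_properties = [] then
    num_attr_vals ^ num_attributes.toNat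
  else
    key_properties.foldl (fun key_idx attr_val => key_idx * num_attr_vals + attr_val) 0

-- ===== PRECONDITION & SPEC =====
-- Pre_ excludes only the empty key list with a negative num_attributes, where Python's
-- '**' returns a FLOAT (not an int; and raises ZeroDivisionError if num_attr_vals = 0).
def Pre_encode_key_idx (num_attributes : Int) (num_attr_vals : Int) (key_properties : List Int) : Prop :=
  key_properties = [] → 0 ≤ num_attributes
instance (num_attributes : Int) (num_attr_vals : Int) (key_properties : List Int) : Decidable (Pre_encode_key_idx num_attributes num_attr_vals key_properties) := by unfold Pre_encode_key_idx; infer_instance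

def pvWitness_encode_key_idx : Int × Int × List Int := (2, 3, [1, 2])

def Spec_encode_key_idx (num_attributes : Int) (num_attr_vals : Int) (key_properties : List Int) (out : Int) : Prop := out = encode_key_idx_alt num_attributes num_attr_vals key_properties
instance (num_attributes : Int) (num_attr_vals : Int) (key_properties : List Int) (out : Int) : Decidable (Spec_encode_key_idx num_attributes num_attr_vals key_properties out) := by unfold Spec_encode_key_idx; infer_instance

-- ===== CLAIM (what is proved, stated in full; the proofs are below) =====
def Claim_equal_encode_key_idx : Prop := ∀ (num_attributes : Int) (num_attr_vals : Int) (key_properties : List Int), Dom_encode_key_idx num_attributes num_attr_vals key_properties → Pre_encode_key_idx num_attributes num_attr_vals key_properties → Spec_encode_key_idx num_attributes num_attr_vals key_properties (encode_key_idx num_attributes num_attr_vals key_properties)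

-- ===== LEMMAS AND PROOFS =====

-- The pop-and-power loop on the reversed list equals the forward Horner fold, shifted by N^digit.
theorem encodeKeyLoop_eq_horner (N : Int) (m : List Int) (k : Int) (d : Nat) :
    encodeKeyLoop N m k d
      = k + (m.reverse.foldl (fun a v => a * N + v) 0) * N ^ d := by
  induction m generalizing k d with
  | nil => simp [encodeKeyLoop]
  | cons v rest ih =>
      simp only [encodeKeyLoop, ih, List.reverse_cons, List.foldl_append, List.foldl_cons,
        List.foldl_nil, pow_succ]
      ring

-- ===== VERDICT (by name: the statement is the Claim_ definition above) =====
theorem encode_key_idx_spec : Claim_equal_encode_key_idx := by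
  intro na N l _ _
  unfold Spec_encode_key_idx encode_key_idx encode_key_idx_alt
  by_cases h : l = []
  · simp [h]
  · simp [h, encodeKeyLoop_eq_horner, List.reverse_reverse]
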